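-- pv_equiv track=rewrite | github.com/snuffy1987/python_examples | 18.py | porovnaj
-- ===== SOURCE A (Python) =====
-- def porovnaj(gen, tip):
--  stat = [0,0]
--  for i in range(0,4):
--   for j in range(0,4):
--     if i == j:
--      if tip[i] == gen[j]:
--       stat[0] = stat[0] + 1
--     else:
--      if tip[i] == gen[j]:
--       stat[1] = stat[1] + 1
--  return stat
-- ===== SOURCE B (Python) =====
-- def _runlen(xs):
--     v = xs[0]
--     k = 1
--     while k < len(xs) and xs[k] == v:
--         k += 1
--     return k
--
--
-- def porovnaj(gen, tip):
--     exact = sum(1 for i in range(4) if tip[i] == gen[i])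
--     t = sorted(tip[:4])
--     g = sorted(gen[:4])
--     pairs = 0
--     while t and g:
--         if t[0] < g[0]:
--             t = t[_runlen(t):]
--         elif g[0] < t[0]:
--             g = g[_runlen(g):]
--         else:
--             kt = _runlen(t)
--             kg = _runlen(g)
--             pairs += kt * kg
--             t = t[kt:]
--             g = g[kg:]
--     return [exact, pairs - exact]
-- ===== Notes on version B (the rewrite author's own statement) =====
-- stated objective: alternative
-- what changed: Replaces A's nested 4x4 double loop by a diagonal pass for exact matches plus sorting both 4-prefixes and a run-length two-pointer merge over the sorted lists that accumulates products of equal-value run lengths, returning [exact, pairs - exact].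
import Mathlib
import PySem

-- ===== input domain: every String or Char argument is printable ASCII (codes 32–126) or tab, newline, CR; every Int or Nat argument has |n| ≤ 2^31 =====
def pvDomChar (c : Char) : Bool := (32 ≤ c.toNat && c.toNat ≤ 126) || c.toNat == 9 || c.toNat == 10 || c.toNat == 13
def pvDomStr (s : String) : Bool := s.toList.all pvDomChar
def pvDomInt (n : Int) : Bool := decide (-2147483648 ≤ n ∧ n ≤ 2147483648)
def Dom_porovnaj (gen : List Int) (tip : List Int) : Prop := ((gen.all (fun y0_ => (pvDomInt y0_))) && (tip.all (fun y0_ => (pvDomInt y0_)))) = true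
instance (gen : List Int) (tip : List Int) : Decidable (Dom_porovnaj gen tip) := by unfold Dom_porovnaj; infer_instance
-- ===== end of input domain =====

-- B replaces A's nested 4×4 double loop by a diagonal pass for exact matches plus
-- sorting both 4-prefixes and a run-length two-pointer merge over the sorted lists
-- accumulating products of equal-value run lengths; returns [exact, pairs - exact].

-- ===== PORT A =====
-- tip[i] / gen[j] are in range for every input admitted by Pre_porovnaj (4 ≤ lengths),
-- so pyGetD's default is never read inside the claim.
def porovnaj (gen : List Int) (tip : List Int) : List Int :=
  let stat :=
    (PySem.List.pyRange 0 4 1).foldl (fun stat i =>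
      (PySem.List.pyRange 0 4 1).foldl (fun stat j =>
        if i = j then
          if PySem.List.pyGetD tip i 0 = PySem.List.pyGetD gen j 0 then
            (stat.1 + 1, stat.2) else stat
        else
          if PySem.List.pyGetD tip i 0 = PySem.List.pyGetD gen j 0 then
            (stat.1, stat.2 + 1) else stat) stat) ((0 : Int), (0 : Int))
  [stat.1, stat.2]

-- ===== PORT B =====
-- _runlen's inner while loop, counting matching elements from index 1 on: the scan
-- over the tail of the list (xs[k] == v while it holds).
def pvRunLenAux (v : Int) : List Int → Nat
  | [] => 0
  | x :: xs => if x = v then pvRunLenAux v xs + 1 else 0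

-- _runlen(xs) for nonempty xs (Source B only calls it on nonempty lists; [] is unreachable).
def pvRunLen : List Int → Nat
  | [] => 0
  | v :: xs => pvRunLenAux v xs + 1

theorem pvRunLen_pos (v : Int) (xs : List Int) : 1 ≤ pvRunLen (v :: xs) := by
  simp [pvRunLen]

-- Source B's while loop over the two sorted lists and the pairs accumulator.
def pvLoop : List Int → List Int → Int → Int
  | [], _, pairs => pairs
  | _ :: _, [], pairs => pairs
  | vt :: t', vg :: g', pairs =>
    if vt < vg then pvLoop ((vt :: t').drop (pvRunLen (vt :: t'))) (vg :: g') pairs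
    else if vg < vt then pvLoop (vt :: t') ((vg :: g').drop (pvRunLen (vg :: g'))) pairs
    else pvLoop ((vt :: t').drop (pvRunLen (vt :: t'))) ((vg :: g').drop (pvRunLen (vg :: g')))
      (pairs + (pvRunLen (vt :: t') : Int) * (pvRunLen (vg :: g') : Int))
termination_by t g _ => t.length + g.length
decreasing_by
  all_goals
    have h1 := pvRunLen_pos vt t'
    have h2 := pvRunLen_pos vg g'
    simp only [List.length_drop, List.length_cons]
    omega

-- tip[i] / gen[i] are in range for every input admitted by Pre_porovnaj (4 ≤ lengths),
-- so pyGetD's default is never read inside the claim.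
def porovnaj_alt (gen : List Int) (tip : List Int) : List Int :=
  let exact : Int := ((PySem.List.pyRange 0 4 1).map (fun i =>
    if PySem.List.pyGetD tip i 0 = PySem.List.pyGetD gen i 0 then (1 : Int) else 0)).sum
  let t := PySem.List.sorted (PySem.List.slice tip none (some 4)) (fun x => x) false
  let g := PySem.List.sorted (PySem.List.slice gen none (some 4)) (fun x => x) false
  let pairs := pvLoop t g 0
  [exact, pairs - exact]

-- ===== PRECONDITION & SPEC =====
-- Pre_ excludes lists shorter than 4, on which both A and B raise IndexError.
def Pre_porovnaj (gen : List Int) (tip : List Int) : Prop :=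
  4 ≤ gen.length ∧ 4 ≤ tip.length
instance (gen : List Int) (tip : List Int) : Decidable (Pre_porovnaj gen tip) := by
  unfold Pre_porovnaj; infer_instance

def pvWitness_porovnaj : List Int × List Int := ([1, 2, 3, 4], [4, 2, 1, 1])

def Spec_porovnaj (gen : List Int) (tip : List Int) (out : List Int) : Prop := out = porovnaj_alt gen tip
instance (gen : List Int) (tip : List Int) (out : List Int) : Decidable (Spec_porovnaj gen tip out) := by unfold Spec_porovnaj; infer_instance

-- ===== CLAIM (what is proved, stated in full; the proofs are below) =====
def Claim_equal_porovnaj : Prop := ∀ (gen : List Int) (tip : List Int), Dom_porovnaj gen tip → Pre_porovnaj gen tip → Spec_porovnaj gen tip (porovnaj gen tip)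

-- ===== LEMMAS AND PROOFS =====

-- The total number of index pairs (i, j) with t[i] = g[j], as a sum of counts.
def pvS (t g : List Int) : Int := (t.map (fun x => (g.count x : Int))).sum

theorem pvS_cons (x : Int) (t g : List Int) :
    pvS (x :: t) g = (g.count x : Int) + pvS t g := by
  simp [pvS]

theorem take_runLenAux (v : Int) (xs : List Int) :
    xs.take (pvRunLenAux v xs) = List.replicate (pvRunLenAux v xs) v := by
  induction xs with
  | nil => rfl
  | cons x xs ih =>
    by_cases h : x = v
    · subst h
      have hx : pvRunLenAux x (x :: xs) = pvRunLenAux x xs + 1 := by simp [pvRunLenAux]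
      rw [hx, List.take_succ_cons, ih, ← List.replicate_succ]
    · simp [pvRunLenAux, h]

theorem take_runLen (v : Int) (xs : List Int) :
    (v :: xs).take (pvRunLen (v :: xs)) = List.replicate (pvRunLen (v :: xs)) v := by
  simp only [pvRunLen, List.take_succ_cons, List.replicate_succ, take_runLenAux]

theorem drop_runLen (v : Int) (xs : List Int) :
    (v :: xs).drop (pvRunLen (v :: xs)) = xs.drop (pvRunLenAux v xs) := by
  simp [pvRunLen]

theorem head_drop_runLenAux (v : Int) (xs : List Int) (hd : Int) (tl : List Int)
    (h : xs.drop (pvRunLenAux v xs) = hd :: tl) : hd ≠ v := by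
  induction xs with
  | nil => simp [pvRunLenAux] at h
  | cons x xs ih =>
    by_cases hx : x = v
    · simp [pvRunLenAux, hx] at h
      exact ih h
    · simp [pvRunLenAux, hx] at h
      rw [← h.1]; exact hx

theorem sorted_drop {t : List Int} (hs : t.Sorted (· ≤ ·)) (n : Nat) :
    (t.drop n).Sorted (· ≤ ·) :=
  List.Pairwise.sublist (List.drop_sublist n t) hs

-- every element after the leading run of a sorted list is strictly greater
theorem gt_of_mem_drop_runLen (v : Int) (xs : List Int)
    (hs : (v :: xs).Sorted (· ≤ ·)) :
    ∀ y ∈ (v :: xs).drop (pvRunLen (v :: xs)), v < y := by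
  intro y hy
  rw [drop_runLen] at hy
  have hxs : xs.Sorted (· ≤ ·) := hs.of_cons
  have hd_sorted : (xs.drop (pvRunLenAux v xs)).Sorted (· ≤ ·) := sorted_drop hxs _
  cases hdr : xs.drop (pvRunLenAux v xs) with
  | nil => rw [hdr] at hy; simp at hy
  | cons hd tl =>
    rw [hdr] at hy hd_sorted
    have hhdv : hd ≠ v := head_drop_runLenAux v xs hd tl hdr
    have hhd_mem : hd ∈ xs := by
      have : hd ∈ xs.drop (pvRunLenAux v xs) := by rw [hdr]; exact List.mem_cons_self
      exact List.mem_of_mem_drop this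
    have hvle : v ≤ hd := (List.pairwise_cons.mp hs).1 hd hhd_mem
    have hvlt : v < hd := lt_of_le_of_ne hvle (Ne.symm hhdv)
    rcases List.mem_cons.mp hy with rfl | hytl
    · exact hvlt
    · exact lt_of_lt_of_le hvlt ((List.pairwise_cons.mp hd_sorted).1 y hytl)

theorem count_decomp (k : Nat) (v : Int) (rest : List Int) (x : Int) :
    (List.replicate k v ++ rest).count x = (if x = v then k else 0) + rest.count x := by
  rw [List.count_append, List.count_replicate]
  simp only [beq_iff_eq]
  by_cases h : x = v
  · subst h; simp
  · simp only [h, if_false]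
    rw [if_neg (fun hvx => h hvx.symm)]

theorem pvS_replicate_append (k : Nat) (v : Int) (t g : List Int) :
    pvS (List.replicate k v ++ t) g = (k : Int) * (g.count v : Int) + pvS t g := by
  induction k with
  | zero => simp
  | succ n ih =>
    rw [List.replicate_succ, List.cons_append, pvS_cons, ih]
    push_cast
    ring

theorem pvS_drop_replicate (t : List Int) (k : Nat) (v : Int) (g₂ : List Int)
    (h : ∀ x ∈ t, x ≠ v) :
    pvS t (List.replicate k v ++ g₂) = pvS t g₂ := by
  induction t with
  | nil => rfl
  | cons x t ih =>
    rw [pvS_cons, pvS_cons, count_decomp]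
    rw [if_neg (h x List.mem_cons_self)]
    rw [ih (fun y hy => h y (List.mem_cons_of_mem x hy))]
    simp

theorem count_eq_zero_of_forall_gt (g : List Int) (v : Int) (h : ∀ y ∈ g, v < y ∨ v ≠ y) :
    g.count v = 0 := by
  rw [List.count_eq_zero]
  intro hv
  rcases h v hv with h' | h'
  · exact absurd rfl (ne_of_lt h').symm
  · exact h' rfl

theorem pvLoop_eq_pvS (n : Nat) :
    ∀ (t g : List Int), t.length + g.length ≤ n →
    t.Sorted (· ≤ ·) → g.Sorted (· ≤ ·) →
    ∀ pairs : Int, pvLoop t g pairs = pairs + pvS t g := by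
  induction n with
  | zero =>
    intro t g hlen _ _ pairs
    have ht : t = [] := List.length_eq_zero_iff.mp (by omega)
    subst ht
    simp [pvLoop, pvS]
  | succ n ih =>
    intro t g hlen hst hsg pairs
    match t, g with
    | [], g => simp [pvLoop, pvS]
    | vt :: t', [] => simp [pvLoop, pvS]
    | vt :: t', vg :: g' =>
      set t := vt :: t' with ht_def
      set g := vg :: g' with hg_def
      have hkt := pvRunLen_pos vt t'
      have hkg := pvRunLen_pos vg g'
      have ht_split : t = List.replicate (pvRunLen t) vt ++ t.drop (pvRunLen t) := by
        conv_lhs => rw [← List.take_append_drop (pvRunLen t) t]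
        rw [take_runLen]
      have hg_split : g = List.replicate (pvRunLen g) vg ++ g.drop (pvRunLen g) := by
        conv_lhs => rw [← List.take_append_drop (pvRunLen g) g]
        rw [take_runLen]
      have hst₂ : (t.drop (pvRunLen t)).Sorted (· ≤ ·) := sorted_drop hst _
      have hsg₂ : (g.drop (pvRunLen g)).Sorted (· ≤ ·) := sorted_drop hsg _
      have htgt : ∀ y ∈ t.drop (pvRunLen t), vt < y := gt_of_mem_drop_runLen vt t' hst
      have hggt : ∀ y ∈ g.drop (pvRunLen g), vg < y := gt_of_mem_drop_runLen vg g' hsg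
      have hlt : (t.drop (pvRunLen t)).length < t.length := by
        simp only [List.length_drop]
        have : 1 ≤ pvRunLen t := hkt
        have : 0 < t.length := by simp [ht_def]
        omega
      have hlg : (g.drop (pvRunLen g)).length < g.length := by
        simp only [List.length_drop]
        have : 1 ≤ pvRunLen g := hkg
        have : 0 < g.length := by simp [hg_def]
        omega
      by_cases h1 : vt < vg
      · -- vt's run matches nothing in g: drop it
        have hcount : g.count vt = 0 := by
          apply count_eq_zero_of_forall_gt
          intro y hy
          rw [hg_split] at hy
          rcases List.mem_append.mp hy with hy | hy
          · right; have := List.eq_of_mem_replicate hy; omega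
          · left; exact lt_trans h1 (hggt y hy)
        have hS : pvS t g = pvS (t.drop (pvRunLen t)) g := by
          conv_lhs => rw [ht_split]
          rw [pvS_replicate_append, hcount]
          simp
        have hstep : pvLoop t g pairs = pvLoop (t.drop (pvRunLen t)) g pairs := by
          rw [ht_def, hg_def, pvLoop]
          simp [h1, ← ht_def, ← hg_def]
        rw [hstep, ih _ _ (by omega) hst₂ hsg pairs, hS]
      · by_cases h2 : vg < vt
        · -- vg's run matches nothing in t: drop it
          have hS : pvS t g = pvS t (g.drop (pvRunLen g)) := by
            conv_lhs => rw [hg_split]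
            apply pvS_drop_replicate
            intro x hx
            rw [ht_split] at hx
            rcases List.mem_append.mp hx with hx | hx
            · have := List.eq_of_mem_replicate hx; omega
            · have := htgt x hx; omega
          have hstep : pvLoop t g pairs = pvLoop t (g.drop (pvRunLen g)) pairs := by
            rw [ht_def, hg_def, pvLoop]
            simp [h1, h2, ← ht_def, ← hg_def]
          rw [hstep, ih _ _ (by omega) hst hsg₂ pairs, hS]
        · -- equal heads: the two runs contribute kt * kg pairs
          have hveq : vt = vg := le_antisymm (not_lt.mp h2) (not_lt.mp h1)
          have hcg : g.count vt = pvRunLen g := by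
            conv_lhs => rw [hg_split]
            rw [count_decomp, if_pos hveq]
            have : (g.drop (pvRunLen g)).count vt = 0 := by
              apply count_eq_zero_of_forall_gt
              intro y hy
              left; rw [hveq]; exact hggt y hy
            omega
          have hS : pvS t g = (pvRunLen t : Int) * (pvRunLen g : Int)
              + pvS (t.drop (pvRunLen t)) (g.drop (pvRunLen g)) := by
            conv_lhs => rw [ht_split]
            rw [pvS_replicate_append, hcg]
            congr 1
            conv_lhs => rw [hg_split]
            apply pvS_drop_replicate
            intro x hx
            have := htgt x hx
            omega
          have hstep : pvLoop t g pairs =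
              pvLoop (t.drop (pvRunLen t)) (g.drop (pvRunLen g))
                (pairs + (pvRunLen t : Int) * (pvRunLen g : Int)) := by
            rw [ht_def, hg_def, pvLoop]
            simp [h1, h2, ← ht_def, ← hg_def]
          rw [hstep, ih _ _ (by omega) hst₂ hsg₂ _, hS]
          ring
      
theorem pvS_perm_left {t t' : List Int} (h : t.Perm t') (g : List Int) :
    pvS t g = pvS t' g := by
  unfold pvS
  exact List.Perm.sum_eq (h.map _)

theorem pvS_perm_right (t : List Int) {g g' : List Int} (h : g.Perm g') :
    pvS t g = pvS t g' := by
  unfold pvS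
  congr 1
  apply List.map_congr_left
  intro x _
  rw [h.count_eq]

theorem pvLoop_sorted (t g : List Int) :
    pvLoop (PySem.List.sorted t (fun x => x) false) (PySem.List.sorted g (fun x => x) false) 0
      = pvS t g := by
  have hst : (PySem.List.sorted t (fun x => x) false).Sorted (· ≤ ·) :=
    PySem.List.sorted_pairwise t (fun x => x)
  have hsg : (PySem.List.sorted g (fun x => x) false).Sorted (· ≤ ·) :=
    PySem.List.sorted_pairwise g (fun x => x)
  rw [pvLoop_eq_pvS (t.length + g.length) _ _
    (by rw [PySem.List.length_sorted, PySem.List.length_sorted]) hst hsg 0]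
  rw [pvS_perm_left (PySem.List.sorted_perm t (fun x => x) false) _,
      pvS_perm_right _ (PySem.List.sorted_perm g (fun x => x) false)]
  simp

set_option maxHeartbeats 1000000 in
theorem key (a b c d e f g h : Int) (gr tr : List Int) :
    porovnaj (a::b::c::d::gr) (e::f::g::h::tr) = porovnaj_alt (a::b::c::d::gr) (e::f::g::h::tr) := by
  have hr : PySem.List.pyRange 0 4 1 = [0, 1, 2, 3] := by decide
  have hg : PySem.List.slice (a::b::c::d::gr) none (some 4) = [a,b,c,d] := by
    rw [show ((4:Int)) = ((4:Nat):Int) from rfl, PySem.List.slice_to_natCast]; rfl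
  have ht : PySem.List.slice (e::f::g::h::tr) none (some 4) = [e,f,g,h] := by
    rw [show ((4:Int)) = ((4:Nat):Int) from rfl, PySem.List.slice_to_natCast]; rfl
  have inner0 : ∀ s : Int × Int,
      List.foldl (fun stat j =>
        if (0:Int) = j then
          if PySem.List.pyGetD (e::f::g::h::tr) 0 0 = PySem.List.pyGetD (a::b::c::d::gr) j 0 then
            (stat.1 + 1, stat.2) else stat
        else
          if PySem.List.pyGetD (e::f::g::h::tr) 0 0 = PySem.List.pyGetD (a::b::c::d::gr) j 0 then
            (stat.1, stat.2 + 1) else stat) s [0, 1, 2, 3]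
      = (s.1 + (if e = a then 1 else 0),
         s.2 + ((if e = b then 1 else 0) + (if e = c then 1 else 0) + (if e = d then 1 else 0))) := by
    intro s
    simp only [List.foldl, PySem.List.pyGetD_ofNat', List.getD]
    norm_num
    split_ifs <;> simp <;> ring
  have inner1 : ∀ s : Int × Int,
      List.foldl (fun stat j =>
        if (1:Int) = j then
          if PySem.List.pyGetD (e::f::g::h::tr) 1 0 = PySem.List.pyGetD (a::b::c::d::gr) j 0 then
            (stat.1 + 1, stat.2) else stat
        else
          if PySem.List.pyGetD (e::f::g::h::tr) 1 0 = PySem.List.pyGetD (a::b::c::d::gr) j 0 then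
            (stat.1, stat.2 + 1) else stat) s [0, 1, 2, 3]
      = (s.1 + (if f = b then 1 else 0),
         s.2 + ((if f = a then 1 else 0) + (if f = c then 1 else 0) + (if f = d then 1 else 0))) := by
    intro s
    simp only [List.foldl, PySem.List.pyGetD_ofNat', List.getD]
    norm_num
    split_ifs <;> simp <;> ring
  have inner2 : ∀ s : Int × Int,
      List.foldl (fun stat j =>
        if (2:Int) = j then
          if PySem.List.pyGetD (e::f::g::h::tr) 2 0 = PySem.List.pyGetD (a::b::c::d::gr) j 0 then
            (stat.1 + 1, stat.2) else stat
        else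
          if PySem.List.pyGetD (e::f::g::h::tr) 2 0 = PySem.List.pyGetD (a::b::c::d::gr) j 0 then
            (stat.1, stat.2 + 1) else stat) s [0, 1, 2, 3]
      = (s.1 + (if g = c then 1 else 0),
         s.2 + ((if g = a then 1 else 0) + (if g = b then 1 else 0) + (if g = d then 1 else 0))) := by
    intro s
    simp only [List.foldl, PySem.List.pyGetD_ofNat', List.getD]
    norm_num
    split_ifs <;> simp <;> ring
  have inner3 : ∀ s : Int × Int,
      List.foldl (fun stat j =>
        if (3:Int) = j then
          if PySem.List.pyGetD (e::f::g::h::tr) 3 0 = PySem.List.pyGetD (a::b::c::d::gr) j 0 then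
            (stat.1 + 1, stat.2) else stat
        else
          if PySem.List.pyGetD (e::f::g::h::tr) 3 0 = PySem.List.pyGetD (a::b::c::d::gr) j 0 then
            (stat.1, stat.2 + 1) else stat) s [0, 1, 2, 3]
      = (s.1 + (if h = d then 1 else 0),
         s.2 + ((if h = a then 1 else 0) + (if h = b then 1 else 0) + (if h = c then 1 else 0))) := by
    intro s
    simp only [List.foldl, PySem.List.pyGetD_ofNat', List.getD]
    norm_num
    split_ifs <;> simp <;> ring
  have foldl4 : ∀ (F : Int × Int → Int → Int × Int) (s : Int × Int),
      List.foldl F s [0, 1, 2, 3] = F (F (F (F s 0) 1) 2) 3 := fun _ _ => rfl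
  have hS : pvS [e,f,g,h] [a,b,c,d] =
      ((if e = a then 1 else 0) + (if e = b then 1 else 0) + (if e = c then 1 else 0) + (if e = d then 1 else 0))
    + ((if f = a then 1 else 0) + (if f = b then 1 else 0) + (if f = c then 1 else 0) + (if f = d then 1 else 0))
    + ((if g = a then 1 else 0) + (if g = b then 1 else 0) + (if g = c then 1 else 0) + (if g = d then 1 else 0))
    + ((if h = a then 1 else 0) + (if h = b then 1 else 0) + (if h = c then 1 else 0) + (if h = d then 1 else 0)) := by
    simp only [pvS, List.map, List.sum_cons, List.sum_nil, List.count_cons, List.count_nil,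
      beq_iff_eq]
    push_cast [apply_ite (fun n : Nat => (n : Int))]
    have swap : ∀ x y : Int, (if x = y then (1:Int) else 0) = (if y = x then 1 else 0) := by
      intro x y; by_cases hxy : x = y <;> simp [hxy, eq_comm]
    simp only [swap a e, swap b e, swap c e, swap d e, swap a f, swap b f, swap c f, swap d f,
      swap a g, swap b g, swap c g, swap d g, swap a h, swap b h, swap c h, swap d h]
    ring
  show porovnaj _ _ = porovnaj_alt _ _
  rw [porovnaj, porovnaj_alt]
  rw [hr, foldl4]
  simp only [inner0, inner1, inner2, inner3]
  rw [hg, ht, pvLoop_sorted, hS]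
  simp only [List.map, List.sum_cons, List.sum_nil, PySem.List.pyGetD_ofNat', List.getD,
    List.getElem?_cons_succ, List.getElem?_cons_zero, Option.getD_some]
  simp only [List.cons.injEq, and_true]
  constructor <;> ring

-- ===== VERDICT (by name: the statement is the Claim_ definition above) =====
theorem porovnaj_spec : Claim_equal_porovnaj := by
  intro gen tip _ hpre
  obtain ⟨hglen, htlen⟩ := hpre
  obtain ⟨a, b, c, d, gr, rfl⟩ : ∃ a b c d r, gen = a :: b :: c :: d :: r := by
    match gen, hglen with
    | a :: b :: c :: d :: r, _ => exact ⟨a, b, c, d, r, rfl⟩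
  obtain ⟨e, f, g, h, tr, rfl⟩ : ∃ a b c d r, tip = a :: b :: c :: d :: r := by
    match tip, htlen with
    | a :: b :: c :: d :: r, _ => exact ⟨a, b, c, d, r, rfl⟩
  exact key a b c d e f g h gr tr
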